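-- pv_equiv track=rewrite | github.com/aleks-kudriavtsev/hackaging_theories | src/theories_pipeline/result_tables.py | prepare_theory_table
-- ===== SOURCE A (Python) =====
-- from typing import Iterable, Mapping, Sequence
--
-- def prepare_theory_table(rows: Iterable[Mapping[str, str]]) -> list[dict[str, str]]:
--     """Return sorted theory rows with consistent formatting."""
--
--     entries: list[tuple[int, str, str, str, str]] = []
--     for row in rows:
--         theory_id = (row.get("theory_id", "") or "").strip()
--         if not theory_id:
--             continue
--         theory_name = (row.get("theory_name", "") or "").strip()
--         count_raw = (row.get("number_of_collected_papers", "") or "").strip()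
--         try:
--             count_value = int(count_raw)
--         except ValueError:
--             count_value = 0
--         display_count = count_raw if count_raw else (str(count_value) if count_value else "")
--         entries.append((count_value, theory_name.lower(), theory_name, theory_id, display_count))
--
--     entries.sort(key=lambda item: (-item[0], item[1], item[3]))
--
--     result: list[dict[str, str]] = []
--     seen: set[str] = set()
--     for count_value, _, theory_name, theory_id, display_count in entries:
--         if theory_id in seen:
--             continue
--         seen.add(theory_id)
--         result.append(
--             {
--                 "theory_id": theory_id,
--                 "theory_name": theory_name,
--                 "number_of_collected_papers": display_count if display_count else str(count_value),
--             }
--         )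
--     return result
-- ===== SOURCE B (Python) =====
-- def prepare_theory_table(rows):
--     """Return sorted theory rows with consistent formatting."""
--     best = {}
--     for row in rows:
--         theory_id = (row.get("theory_id", "") or "").strip()
--         if not theory_id:
--             continue
--         theory_name = (row.get("theory_name", "") or "").strip()
--         count_raw = (row.get("number_of_collected_papers", "") or "").strip()
--         try:
--             count_value = int(count_raw)
--         except ValueError:
--             count_value = 0
--         entry = (count_value, theory_name.lower(), theory_name,
--                  count_raw if count_raw else "0")
--         cur = best.get(theory_id)
--         if cur is None or (-entry[0], entry[1]) < (-cur[0], cur[1]):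
--             best[theory_id] = entry
--     ordered = sorted(best.items(), key=lambda kv: (-kv[1][0], kv[1][1], kv[0]))
--     return [
--         {
--             "theory_id": tid,
--             "theory_name": name,
--             "number_of_collected_papers": disp,
--         }
--         for tid, (_count, _lower, name, disp) in ordered
--     ]
-- ===== Notes on version B (the rewrite author's own statement) =====
-- stated objective: alternative
-- what changed: Replaces A's build-all-entries -> sort the whole list -> linear dedup-by-seen-set pipeline with a dict keyed by theory_id that keeps only the best (-count, name.lower) entry per id during a single row scan (first-seen wins ties), then sorts the surviving one-per-id items.
import Mathlib
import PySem

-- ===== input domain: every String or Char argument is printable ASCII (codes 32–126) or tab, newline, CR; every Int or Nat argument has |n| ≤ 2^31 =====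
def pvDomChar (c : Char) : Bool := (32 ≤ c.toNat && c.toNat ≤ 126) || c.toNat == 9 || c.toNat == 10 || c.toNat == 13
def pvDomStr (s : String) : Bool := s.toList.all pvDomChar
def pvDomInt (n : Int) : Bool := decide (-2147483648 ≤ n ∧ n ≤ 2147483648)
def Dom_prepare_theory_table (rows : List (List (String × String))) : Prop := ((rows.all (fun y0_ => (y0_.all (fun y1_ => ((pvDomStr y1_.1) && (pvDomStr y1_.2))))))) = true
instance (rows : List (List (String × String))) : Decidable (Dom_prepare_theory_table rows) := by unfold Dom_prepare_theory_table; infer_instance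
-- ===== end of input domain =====

-- B replaces A's build-all → sort-all → linear dedup-by-seen-set pipeline with a dict keyed by
-- theory_id that keeps only the best entry per id during the row scan, then sorts the surviving
-- items (objective: alternative decomposition, same cost; no speed claim).

-- ===== PORT A =====
-- shared with port B: '(row.get(k, "") or "").strip()' ('or ""' is the identity here: the only
-- falsy str is "", and strip "" = "")
def pvGetStripped (row : List (String × String)) (k : String) : String :=
  PySem.Str.strip ((PySem.Dict.mk row).getD k "")

-- sort key lambda item: (-item[0], item[1], item[3]) as a lexicographic triple
def pvKeyA (e : Int × String × String × String × String) : Lex (Int × Lex (String × String)) :=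
  toLex (-e.1, toLex (e.2.1, e.2.2.2.1))

-- A's first loop: entries.append((count_value, name.lower(), name, id, display_count))
def pvEntriesA (rows : List (List (String × String))) :
    List (Int × String × String × String × String) :=
  rows.foldl (fun entries row =>
    let theory_id := pvGetStripped row "theory_id"
    if theory_id = "" then entries else
    let theory_name := pvGetStripped row "theory_name"
    let count_raw := pvGetStripped row "number_of_collected_papers"
    let count_value := (PySem.Int.ofStr? count_raw).getD 0   -- try int(...) except ValueError: 0
    let display_count :=
      if count_raw ≠ "" then count_raw
      else if count_value ≠ 0 then PySem.Int.toStr count_value else ""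
    entries ++ [(count_value, PySem.Str.lower theory_name, theory_name, theory_id, display_count)]) []

def prepare_theory_table (rows : List (List (String × String))) : List (List (String × String)) :=
  ((PySem.List.sorted (pvEntriesA rows) pvKeyA).foldl
    (fun st e =>
      if PySem.Set.contains st.2 e.2.2.2.1 then st
      else (st.1 ++ [[("theory_id", e.2.2.2.1), ("theory_name", e.2.2.1),
              ("number_of_collected_papers",
                if e.2.2.2.2 ≠ "" then e.2.2.2.2 else PySem.Int.toStr e.1)]],
            PySem.Set.add st.2 e.2.2.2.1))
    (([] : List (List (String × String))), (PySem.Set.empty : PySem.Set String))).1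

-- ===== PORT B =====
-- sort key lambda kv: (-kv[1][0], kv[1][1], kv[0])
def pvKeyB (kv : String × Int × String × String × String) : Lex (Int × Lex (String × String)) :=
  toLex (-kv.2.1, toLex (kv.2.2.1, kv.1))

-- B's single row scan: best[tid] := entry unless the stored entry's (-count, lower) is ≤ it
def pvBestB (rows : List (List (String × String))) :
    PySem.Dict String (Int × String × String × String) :=
  rows.foldl (fun best row =>
    let tid := pvGetStripped row "theory_id"
    if tid = "" then best else
    let name := pvGetStripped row "theory_name"
    let raw := pvGetStripped row "number_of_collected_papers"
    let cv := (PySem.Int.ofStr? raw).getD 0                  -- try int(...) except ValueError: 0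
    let entry := (cv, PySem.Str.lower name, name, if raw ≠ "" then raw else "0")
    match best.get? tid with
    | none => best.insert tid entry
    | some cur =>
        if toLex (-entry.1, entry.2.1) < toLex (-cur.1, cur.2.1)
        then best.insert tid entry else best) PySem.Dict.empty

def prepare_theory_table_alt (rows : List (List (String × String))) :
    List (List (String × String)) :=
  (PySem.List.sorted (pvBestB rows).items pvKeyB).map (fun kv =>
    [("theory_id", kv.1), ("theory_name", kv.2.2.2.1),
     ("number_of_collected_papers", kv.2.2.2.2)])

-- ===== PRECONDITION & SPEC =====
def Spec_prepare_theory_table (rows : List (List (String × String))) (out : List (List (String × String))) : Prop := out = prepare_theory_table_alt rows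
instance (rows : List (List (String × String))) (out : List (List (String × String))) : Decidable (Spec_prepare_theory_table rows out) := by unfold Spec_prepare_theory_table; infer_instance

-- ===== CLAIM (what is proved, stated in full; the proofs are below) =====
def Claim_equal_prepare_theory_table : Prop := ∀ (rows : List (List (String × String))), Dom_prepare_theory_table rows → Spec_prepare_theory_table rows (prepare_theory_table rows)

-- ===== LEMMAS AND PROOFS =====

abbrev pvE := Int × String × String × String × String
abbrev pvV := Int × String × String × String

def pvId (e : pvE) : String := e.2.2.2.1
def pvVal (e : pvE) : pvV :=
  (e.1, e.2.1, e.2.2.1, if e.2.2.2.2 ≠ "" then e.2.2.2.2 else PySem.Int.toStr e.1)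
def pvItem (e : pvE) : String × pvV := (pvId e, pvVal e)
def pvFmt (kv : String × pvV) : List (String × String) :=
  [("theory_id", kv.1), ("theory_name", kv.2.2.2.1),
   ("number_of_collected_papers", kv.2.2.2.2)]

def pvMin3 (acc : Option pvE) (e : pvE) : Option pvE :=
  match acc with
  | none => some e
  | some a => if pvKeyA e < pvKeyA a then some e else some a

def pvMin2 (acc : Option pvE) (e : pvE) : Option pvE :=
  match acc with
  | none => some e
  | some a => if toLex (-e.1, e.2.1) < toLex (-a.1, a.2.1) then some e else some a

def pvMinV (acc : Option pvV) (e : pvE) : Option pvV :=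
  match acc with
  | none => some (pvVal e)
  | some c => if toLex (-e.1, e.2.1) < toLex (-c.1, c.2.1) then some (pvVal e) else some c

def pvStep (d : PySem.Dict String pvV) (e : pvE) : PySem.Dict String pvV :=
  match d.get? (pvId e) with
  | none => d.insert (pvId e) (pvVal e)
  | some c => if toLex (-e.1, e.2.1) < toLex (-c.1, c.2.1) then d.insert (pvId e) (pvVal e) else d

def pvDedup (seen : PySem.Set String) : List pvE → List pvE
  | [] => []
  | e :: S =>
      if PySem.Set.contains seen (pvId e) then pvDedup seen S
      else e :: pvDedup (PySem.Set.add seen (pvId e)) S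

-- the entry A's sorted-then-dedup pass keeps for a given id, as one left fold
def pvWE (rows : List (List (String × String))) (id : String) : Option pvE :=
  ((pvEntriesA rows).filter (fun x => pvId x == id)).foldl pvMin2 none

-- ---- small Set facts ----

theorem pv_contains_add_self (s : PySem.Set String) (y : String) :
    PySem.Set.contains (PySem.Set.add s y) y = true :=
  (PySem.Set.contains_iff _ _).2 ((PySem.Set.mem_add _ _ _).2 (Or.inr rfl))

theorem pv_contains_add_ne (s : PySem.Set String) (y z : String) (h : z ≠ y) :
    PySem.Set.contains (PySem.Set.add s y) z = PySem.Set.contains s z := by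
  cases hc : PySem.Set.contains s z with
  | true =>
      exact (PySem.Set.contains_iff _ _).2
        ((PySem.Set.mem_add _ _ _).2 (Or.inl ((PySem.Set.contains_iff _ _).1 hc)))
  | false =>
      cases hc' : PySem.Set.contains (PySem.Set.add s y) z with
      | false => rfl
      | true =>
          rcases (PySem.Set.mem_add _ _ _).1 ((PySem.Set.contains_iff _ _).1 hc') with hm | hm
          · rw [(PySem.Set.contains_iff _ _).2 hm] at hc; cases hc
          · exact absurd hm h

-- ---- A-side loop shapes ----

theorem pv_aloop (S : List pvE) (res : List (List (String × String))) (seen : PySem.Set String) :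
    (S.foldl
      (fun st e =>
        if PySem.Set.contains st.2 e.2.2.2.1 then st
        else (st.1 ++ [[("theory_id", e.2.2.2.1), ("theory_name", e.2.2.1),
                ("number_of_collected_papers",
                  if e.2.2.2.2 ≠ "" then e.2.2.2.2 else PySem.Int.toStr e.1)]],
              PySem.Set.add st.2 e.2.2.2.1))
      (res, seen)).1 = res ++ (pvDedup seen S).map (fun e => pvFmt (pvItem e)) := by
  induction S generalizing res seen with
  | nil => simp [pvDedup]
  | cons e S ih =>
      rw [List.foldl_cons]
      cases h : PySem.Set.contains seen (pvId e) with
      | true =>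
          rw [show (if PySem.Set.contains (res, seen).2 e.2.2.2.1 then (res, seen)
                else ((res, seen).1 ++ [[("theory_id", e.2.2.2.1), ("theory_name", e.2.2.1),
                        ("number_of_collected_papers",
                          if e.2.2.2.2 ≠ "" then e.2.2.2.2 else PySem.Int.toStr e.1)]],
                      PySem.Set.add (res, seen).2 e.2.2.2.1)) = (res, seen) from by
            simp only [show PySem.Set.contains seen e.2.2.2.1 = true from h]; rfl]
          rw [ih, show pvDedup seen (e :: S) = pvDedup seen S from by
            simp only [pvDedup, h]; rfl]
      | false =>
          rw [show (if PySem.Set.contains (res, seen).2 e.2.2.2.1 then (res, seen)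
                else ((res, seen).1 ++ [[("theory_id", e.2.2.2.1), ("theory_name", e.2.2.1),
                        ("number_of_collected_papers",
                          if e.2.2.2.2 ≠ "" then e.2.2.2.2 else PySem.Int.toStr e.1)]],
                      PySem.Set.add (res, seen).2 e.2.2.2.1))
              = (res ++ [[("theory_id", e.2.2.2.1), ("theory_name", e.2.2.1),
                        ("number_of_collected_papers",
                          if e.2.2.2.2 ≠ "" then e.2.2.2.2 else PySem.Int.toStr e.1)]],
                      PySem.Set.add seen e.2.2.2.1) from by
            simp only [show PySem.Set.contains seen e.2.2.2.1 = false from h]; rfl]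
          rw [ih, show pvDedup seen (e :: S)
                = e :: pvDedup (PySem.Set.add seen (pvId e)) S from by
            simp only [pvDedup, h]; rfl]
          simp [pvFmt, pvItem, pvId, pvVal]

theorem pv_val_eq (raw : String) :
    (if raw ≠ "" then raw else "0")
      = (if (if raw ≠ "" then raw
             else if ((PySem.Int.ofStr? raw).getD 0) ≠ 0
             then PySem.Int.toStr ((PySem.Int.ofStr? raw).getD 0) else "") ≠ "" then
           (if raw ≠ "" then raw
            else if ((PySem.Int.ofStr? raw).getD 0) ≠ 0
            then PySem.Int.toStr ((PySem.Int.ofStr? raw).getD 0) else "")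
         else PySem.Int.toStr ((PySem.Int.ofStr? raw).getD 0)) := by
  by_cases h : raw = ""
  · subst h; decide
  · simp [h]

theorem pv_bstep (d : PySem.Dict String pvV) (tid name raw : String) :
    (match d.get? tid with
     | none =>
         d.insert tid
           ((PySem.Int.ofStr? raw).getD 0, PySem.Str.lower name, name,
             if raw ≠ "" then raw else "0")
     | some cur =>
         if toLex (-((PySem.Int.ofStr? raw).getD 0, PySem.Str.lower name, name,
               if raw ≠ "" then raw else "0").1,
             ((PySem.Int.ofStr? raw).getD 0, PySem.Str.lower name, name,
               if raw ≠ "" then raw else "0").2.1) < toLex (-cur.1, cur.2.1)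
         then d.insert tid
           ((PySem.Int.ofStr? raw).getD 0, PySem.Str.lower name, name,
             if raw ≠ "" then raw else "0")
         else d)
    = pvStep d ((PySem.Int.ofStr? raw).getD 0, PySem.Str.lower name, name, tid,
        if raw ≠ "" then raw
        else if ((PySem.Int.ofStr? raw).getD 0) ≠ 0
        then PySem.Int.toStr ((PySem.Int.ofStr? raw).getD 0) else "") := by
  simp only [pvStep, pvId, pvVal, ← pv_val_eq raw]






def pvRowEntries (row : List (String × String)) : List pvE :=
  if pvGetStripped row "theory_id" = "" then [] else
  [((PySem.Int.ofStr? (pvGetStripped row "number_of_collected_papers")).getD 0,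
    PySem.Str.lower (pvGetStripped row "theory_name"),
    pvGetStripped row "theory_name", pvGetStripped row "theory_id",
    if pvGetStripped row "number_of_collected_papers" ≠ "" then
      pvGetStripped row "number_of_collected_papers"
    else if ((PySem.Int.ofStr? (pvGetStripped row "number_of_collected_papers")).getD 0) ≠ 0
    then PySem.Int.toStr ((PySem.Int.ofStr? (pvGetStripped row "number_of_collected_papers")).getD 0)
    else "")]

theorem pv_brow (d : PySem.Dict String pvV) (row : List (String × String)) :
    (fun best row =>
      let tid := pvGetStripped row "theory_id"
      if tid = "" then best else
      let name := pvGetStripped row "theory_name"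
      let raw := pvGetStripped row "number_of_collected_papers"
      let cv := (PySem.Int.ofStr? raw).getD 0
      let entry := (cv, PySem.Str.lower name, name, if raw ≠ "" then raw else "0")
      match (best : PySem.Dict String pvV).get? tid with
      | none => best.insert tid entry
      | some cur =>
          if toLex (-entry.1, entry.2.1) < toLex (-cur.1, cur.2.1)
          then best.insert tid entry else best) d row
    = (pvRowEntries row).foldl pvStep d := by
  rw [pvRowEntries]
  show (if pvGetStripped row "theory_id" = "" then d else
      match d.get? (pvGetStripped row "theory_id") with
      | none =>
          d.insert (pvGetStripped row "theory_id")
            ((PySem.Int.ofStr? (pvGetStripped row "number_of_collected_papers")).getD 0,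
              PySem.Str.lower (pvGetStripped row "theory_name"),
              pvGetStripped row "theory_name",
              if pvGetStripped row "number_of_collected_papers" ≠ "" then
                pvGetStripped row "number_of_collected_papers" else "0")
      | some cur =>
          if toLex (-(((PySem.Int.ofStr? (pvGetStripped row "number_of_collected_papers")).getD 0,
                  PySem.Str.lower (pvGetStripped row "theory_name"),
                  pvGetStripped row "theory_name",
                  if pvGetStripped row "number_of_collected_papers" ≠ "" then
                    pvGetStripped row "number_of_collected_papers" else "0").1),
                ((PySem.Int.ofStr? (pvGetStripped row "number_of_collected_papers")).getD 0,
                  PySem.Str.lower (pvGetStripped row "theory_name"),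
                  pvGetStripped row "theory_name",
                  if pvGetStripped row "number_of_collected_papers" ≠ "" then
                    pvGetStripped row "number_of_collected_papers" else "0").2.1)
              < toLex (-cur.1, cur.2.1)
          then d.insert (pvGetStripped row "theory_id")
            ((PySem.Int.ofStr? (pvGetStripped row "number_of_collected_papers")).getD 0,
              PySem.Str.lower (pvGetStripped row "theory_name"),
              pvGetStripped row "theory_name",
              if pvGetStripped row "number_of_collected_papers" ≠ "" then
                pvGetStripped row "number_of_collected_papers" else "0")
          else d)
    = ((if pvGetStripped row "theory_id" = "" then ([] : List pvE) else
        [((PySem.Int.ofStr? (pvGetStripped row "number_of_collected_papers")).getD 0,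
          PySem.Str.lower (pvGetStripped row "theory_name"),
          pvGetStripped row "theory_name", pvGetStripped row "theory_id",
          if pvGetStripped row "number_of_collected_papers" ≠ "" then
            pvGetStripped row "number_of_collected_papers"
          else if ((PySem.Int.ofStr? (pvGetStripped row "number_of_collected_papers")).getD 0) ≠ 0
          then PySem.Int.toStr
            ((PySem.Int.ofStr? (pvGetStripped row "number_of_collected_papers")).getD 0)
          else "")]).foldl pvStep d)
  generalize pvGetStripped row "theory_id" = tid
  generalize pvGetStripped row "theory_name" = name
  generalize pvGetStripped row "number_of_collected_papers" = raw
  by_cases h : tid = ""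
  · rw [if_pos h, if_pos h]
    rfl
  · rw [if_neg h, if_neg h, List.foldl_cons, List.foldl_nil]
    exact pv_bstep d tid name raw

theorem pv_fold_shift {β : Type} (g : List (String × String) → List β)
    (rows : List (List (String × String))) :
    ∀ acc, rows.foldl (fun a r => a ++ g r) acc
      = acc ++ rows.foldl (fun a r => a ++ g r) [] := by
  induction rows with
  | nil => intro acc; simp
  | cons row rows ih =>
      intro acc
      rw [List.foldl_cons, List.foldl_cons, ih, ih]
      simp [List.append_assoc]

theorem pv_fold_factor {σ β : Type} (f : σ → List (String × String) → σ)
    (g : List (String × String) → List β) (step : σ → β → σ)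
    (hf : ∀ d row, f d row = (g row).foldl step d)
    (rows : List (List (String × String))) :
    ∀ d, rows.foldl f d = (rows.foldl (fun a r => a ++ g r) []).foldl step d := by
  induction rows with
  | nil => intro d; rfl
  | cons row rows ih =>
      intro d
      rw [List.foldl_cons, List.foldl_cons, ih, hf, List.nil_append,
        pv_fold_shift g rows (g row), List.foldl_append]

theorem pv_entriesA_eq (rows : List (List (String × String))) :
    pvEntriesA rows = rows.foldl (fun acc row => acc ++ pvRowEntries row) [] := by
  unfold pvEntriesA
  apply PySem.List.foldl_congr_mem
  intro acc row _
  by_cases h : pvGetStripped row "theory_id" = "" <;> simp [pvRowEntries, h]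

theorem pv_bfold (rows : List (List (String × String))) :
    pvBestB rows = (pvEntriesA rows).foldl pvStep PySem.Dict.empty := by
  rw [pv_entriesA_eq]
  exact pv_fold_factor _ pvRowEntries pvStep pv_brow rows PySem.Dict.empty


-- ---- the dict fold, looked up at one key ----

theorem pv_get_fold (es : List pvE) (id : String) :
    ∀ d : PySem.Dict String pvV,
      (es.foldl pvStep d).get? id
        = es.foldl (fun acc e => if pvId e = id then pvMinV acc e else acc) (d.get? id) := by
  induction es with
  | nil => intro d; simp
  | cons e es ih =>
      intro d
      simp only [List.foldl_cons]
      rw [ih]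
      have hstep : (pvStep d e).get? id
          = if pvId e = id then pvMinV (d.get? id) e else d.get? id := by
        by_cases h : pvId e = id
        · subst h
          simp only [pvStep, pvMinV]
          cases hc : d.get? (pvId e) with
          | none => simp
          | some c =>
              by_cases hlt : toLex (-e.1, e.2.1) < toLex (-c.1, c.2.1)
              · simp [hlt]
              · simp [hlt, hc]
        · simp only [if_neg h, pvStep]
          cases hc : d.get? (pvId e) with
          | none => simp [PySem.Dict.get?_insert, Ne.symm h]
          | some c =>
              by_cases hlt : toLex (-e.1, e.2.1) < toLex (-c.1, c.2.1)
              · simp [hlt, PySem.Dict.get?_insert, Ne.symm h]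
              · simp [hlt]
      rw [hstep]

theorem pv_keys_nodup (es : List pvE) :
    ∀ d : PySem.Dict String pvV, d.keys.Nodup → (es.foldl pvStep d).keys.Nodup := by
  induction es with
  | nil => intro d h; simpa using h
  | cons e es ih =>
      intro d h
      rw [List.foldl_cons]
      apply ih
      unfold pvStep
      cases d.get? (pvId e) with
      | none => exact PySem.Dict.nodup_keys_insert d _ _ h
      | some c =>
          by_cases hlt : toLex (-e.1, e.2.1) < toLex (-c.1, c.2.1)
          · simpa [hlt] using PySem.Dict.nodup_keys_insert d (pvId e) (pvVal e) h
          · simpa [hlt] using h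

theorem pv_min_map (es : List pvE) :
    ∀ acc : Option pvE, (es.foldl pvMin2 acc).map pvVal = es.foldl pvMinV (acc.map pvVal) := by
  induction es with
  | nil => intro acc; simp
  | cons e es ih =>
      intro acc
      simp only [List.foldl_cons]
      rw [ih]
      congr 1
      cases acc with
      | none => simp [pvMin2, pvMinV]
      | some a =>
          simp only [pvMin2, pvMinV, Option.map_some, pvVal]
          split <;> simp [pvVal]

theorem pv_lt_iff (e a : pvE) (h : pvId e = pvId a) :
    pvKeyA e < pvKeyA a ↔ toLex (-e.1, e.2.1) < toLex (-a.1, a.2.1) := by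
  simp only [pvKeyA, Prod.Lex.lt_iff, ofLex_toLex]
  simp only [pvId] at h
  rw [h]
  constructor
  · rintro (h1 | ⟨h1, h2⟩)
    · exact Or.inl h1
    · rcases h2 with h2 | ⟨h2, h3⟩
      · exact Or.inr ⟨h1, h2⟩
      · exact absurd h3 (lt_irrefl _)
  · rintro (h1 | ⟨h1, h2⟩)
    · exact Or.inl h1
    · exact Or.inr ⟨h1, Or.inl h2⟩

theorem pv_min3_eq_min2 (fs : List pvE) (id : String) (hall : ∀ e ∈ fs, pvId e = id) :
    ∀ acc : Option pvE, (∀ a, acc = some a → pvId a = id) →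
      fs.foldl pvMin3 acc = fs.foldl pvMin2 acc := by
  induction fs with
  | nil => intro acc _; rfl
  | cons e fs ih =>
      intro acc hacc
      have he : pvId e = id := hall e (by simp)
      simp only [List.foldl_cons]
      have hstep : pvMin3 acc e = pvMin2 acc e := by
        cases acc with
        | none => rfl
        | some a =>
            have ha : pvId a = id := hacc a rfl
            simp only [pvMin3, pvMin2]
            rw [if_congr (pv_lt_iff e a (he.trans ha.symm)) rfl rfl]
      rw [hstep]
      apply ih (fun x hx => hall x (by simp [hx])) (pvMin2 acc e)
      intro a ha
      cases acc with
      | none =>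
          simp only [pvMin2] at ha
          cases ha; exact he
      | some b =>
          simp only [pvMin2] at ha
          split at ha
          · cases ha; exact he
          · cases ha; exact hacc _ rfl

theorem pv_min2_mem (fs : List pvE) :
    ∀ (acc : Option pvE) (e : pvE), fs.foldl pvMin2 acc = some e → acc = some e ∨ e ∈ fs := by
  induction fs with
  | nil => intro acc e h; exact Or.inl h
  | cons x fs ih =>
      intro acc e h
      rw [List.foldl_cons] at h
      rcases ih _ e h with h' | h'
      · cases acc with
        | none =>
            simp only [pvMin2] at h'
            cases h'; exact Or.inr (by simp)
        | some a =>
            simp only [pvMin2] at h'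
            split at h' <;> cases h'
            · exact Or.inr (by simp)
            · exact Or.inl rfl
      · exact Or.inr (by simp [h'])

-- ---- head of the stable sort is the first minimum ----

theorem pv_insertBy_head (bf : pvE → pvE → Bool) (x : pvE) (M : List pvE)
    (h : ∀ z ∈ M, bf x z = true) : PySem.List.insertBy bf x M = x :: M := by
  cases M with
  | nil => simp [PySem.List.insertBy]
  | cons m M => simp [PySem.List.insertBy, h m (by simp)]

theorem pv_head_sorted (ys : List pvE) :
    (PySem.List.sorted ys pvKeyA).head? = ys.foldl pvMin3 none := by
  induction ys using List.reverseRecOn with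
  | nil => simp [PySem.List.sorted_eq_foldl_insertBy]
  | append_singleton ys y ih =>
      rw [PySem.List.sorted_eq_foldl_insertBy, List.foldl_append,
        ← PySem.List.sorted_eq_foldl_insertBy, List.foldl_append]
      simp only [List.foldl_cons, List.foldl_nil]
      cases hs : PySem.List.sorted ys pvKeyA with
      | nil =>
          have hy : ys = [] := (PySem.List.sorted_eq_nil_iff ys pvKeyA false).1 hs
          subst hy
          simp [PySem.List.insertBy, pvMin3]
      | cons h t =>
          rw [hs] at ih
          simp only [List.head?_cons] at ih
          rw [← ih]
          by_cases hlt : pvKeyA y < pvKeyA h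
          · simp [PySem.List.insertBy, hlt, pvMin3]
          · simp [PySem.List.insertBy, hlt, pvMin3]

-- ---- the stable sort commutes with filter ----

theorem pv_insertBy_filter (p : pvE → Bool) (x : pvE) (L : List pvE)
    (hL : L.Pairwise (fun a b => pvKeyA a ≤ pvKeyA b)) :
    (PySem.List.insertBy (fun a b => decide (pvKeyA a < pvKeyA b)) x L).filter p
      = if p x then PySem.List.insertBy (fun a b => decide (pvKeyA a < pvKeyA b)) x (L.filter p)
        else L.filter p := by
  induction L with
  | nil => cases hpx : p x <;> simp [PySem.List.insertBy, hpx]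
  | cons y L ihL =>
      have hL' : L.Pairwise (fun a b => pvKeyA a ≤ pvKeyA b) := hL.tail
      have hyz : ∀ z ∈ L, pvKeyA y ≤ pvKeyA z := fun z hz => (List.pairwise_cons.1 hL).1 z hz
      by_cases hlt : pvKeyA x < pvKeyA y
      · rw [show PySem.List.insertBy (fun a b => decide (pvKeyA a < pvKeyA b)) x (y :: L)
              = x :: y :: L from by simp [PySem.List.insertBy, hlt]]
        cases hpx : p x with
        | false => simp [List.filter_cons, hpx]
        | true =>
            rw [if_pos rfl, List.filter_cons, List.filter_cons]
            cases hpy : p y with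
            | false =>
                simp only [Bool.false_eq_true, if_false, hpx, if_true]
                rw [pv_insertBy_head]
                intro z hz
                simp only [decide_eq_true_eq]
                exact lt_of_lt_of_le hlt (hyz z (List.mem_of_mem_filter hz))
            | true =>
                simp only [if_true, hpx]
                rw [pv_insertBy_head]
                intro z hz
                simp only [decide_eq_true_eq]
                rcases List.mem_cons.1 hz with rfl | hz'
                · exact hlt
                · exact lt_of_lt_of_le hlt (hyz z (List.mem_of_mem_filter hz'))
      · rw [show PySem.List.insertBy (fun a b => decide (pvKeyA a < pvKeyA b)) x (y :: L)
              = y :: PySem.List.insertBy (fun a b => decide (pvKeyA a < pvKeyA b)) x L from by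
            simp [PySem.List.insertBy, hlt]]
        rw [List.filter_cons, List.filter_cons]
        cases hpy : p y with
        | false =>
            simp only [Bool.false_eq_true, if_false]
            exact ihL hL'
        | true =>
            simp only [if_true]
            rw [ihL hL']
            cases hpx : p x with
            | false => simp
            | true =>
                simp only [if_true]
                rw [show PySem.List.insertBy (fun a b => decide (pvKeyA a < pvKeyA b)) x
                      (y :: L.filter p)
                    = y :: PySem.List.insertBy (fun a b => decide (pvKeyA a < pvKeyA b)) x
                        (L.filter p) from by simp [PySem.List.insertBy, hlt]]

theorem pv_filter_sorted (xs : List pvE) (p : pvE → Bool) :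
    (PySem.List.sorted xs pvKeyA).filter p = PySem.List.sorted (xs.filter p) pvKeyA := by
  induction xs using List.reverseRecOn with
  | nil => simp [PySem.List.sorted_eq_foldl_insertBy]
  | append_singleton xs x ih =>
      rw [PySem.List.sorted_eq_foldl_insertBy, List.foldl_append,
        ← PySem.List.sorted_eq_foldl_insertBy]
      simp only [List.foldl_cons, List.foldl_nil]
      rw [pv_insertBy_filter p x _ (PySem.List.sorted_pairwise xs pvKeyA), ih, List.filter_append]
      cases hpx : p x with
      | false =>
          simp only [Bool.false_eq_true, if_false, List.filter_cons, hpx, List.filter_nil,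
            List.append_nil]
      | true =>
          simp only [if_true, List.filter_cons, hpx, List.filter_nil]
          conv_rhs => rw [PySem.List.sorted_eq_foldl_insertBy, List.foldl_append,
            ← PySem.List.sorted_eq_foldl_insertBy]
          simp

-- ---- the dedup pass, characterised by membership ----

theorem pv_dedup_mem (S : List pvE) :
    ∀ (seen : PySem.Set String) (x : pvE),
      x ∈ pvDedup seen S
        ↔ PySem.Set.contains seen (pvId x) = false
            ∧ (S.filter (fun e => pvId e == pvId x)).head? = some x := by
  induction S with
  | nil => intro seen x; simp [pvDedup]
  | cons e S ih =>
      intro seen x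
      by_cases hid : pvId e = pvId x
      · rw [List.filter_cons, if_pos (by simp [hid])]
        simp only [List.head?_cons]
        cases hseen : PySem.Set.contains seen (pvId e) with
        | true =>
            rw [show pvDedup seen (e :: S) = pvDedup seen S from by
              simp only [pvDedup, hseen]; rfl]
            rw [hid] at hseen
            constructor
            · intro hx
              have h1 := ((ih seen x).1 hx).1
              rw [hseen] at h1
              cases h1
            · rintro ⟨h1, -⟩
              rw [hseen] at h1; cases h1
        | false =>
            rw [show pvDedup seen (e :: S)
                  = e :: pvDedup (PySem.Set.add seen (pvId e)) S from by
              simp only [pvDedup, hseen]; rfl]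
            constructor
            · intro hx
              rcases List.mem_cons.1 hx with rfl | hx'
              · exact ⟨by rw [← hid]; exact hseen, rfl⟩
              · have h1 := ((ih _ x).1 hx').1
                rw [← hid, pv_contains_add_self] at h1
                cases h1
            · rintro ⟨-, h2⟩
              cases h2
              exact List.mem_cons_self
      · have hfe : (pvId e == pvId x) = false := by simp [hid]
        rw [List.filter_cons, hfe]
        simp only [Bool.false_eq_true, if_false]
        cases hseen : PySem.Set.contains seen (pvId e) with
        | true =>
            rw [show pvDedup seen (e :: S) = pvDedup seen S from by
              simp only [pvDedup, hseen]; rfl]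
            exact ih seen x
        | false =>
            rw [show pvDedup seen (e :: S)
                  = e :: pvDedup (PySem.Set.add seen (pvId e)) S from by
              simp only [pvDedup, hseen]; rfl]
            constructor
            · intro hx
              rcases List.mem_cons.1 hx with rfl | hx'
              · exact absurd rfl hid
              · have h' := (ih _ x).1 hx'
                refine ⟨?_, h'.2⟩
                rw [← pv_contains_add_ne seen (pvId e) (pvId x) (fun hz => hid hz.symm)]
                exact h'.1
            · rintro ⟨h1, h2⟩
              apply List.mem_cons_of_mem
              apply (ih _ x).2
              refine ⟨?_, h2⟩
              rw [pv_contains_add_ne seen (pvId e) (pvId x) (fun hz => hid hz.symm)]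
              exact h1

theorem pv_dedup_sublist (S : List pvE) :
    ∀ seen, (pvDedup seen S).Sublist S := by
  induction S with
  | nil => intro seen; simp [pvDedup]
  | cons e S ih =>
      intro seen
      cases hseen : PySem.Set.contains seen (pvId e) with
      | true =>
          rw [show pvDedup seen (e :: S) = pvDedup seen S from by
            simp only [pvDedup, hseen]; rfl]
          exact (ih seen).cons e
      | false =>
          rw [show pvDedup seen (e :: S)
                = e :: pvDedup (PySem.Set.add seen (pvId e)) S from by
            simp only [pvDedup, hseen]; rfl]
          exact (ih _).cons₂ e

theorem pv_dedup_nodup (S : List pvE) :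
    ∀ seen, ((pvDedup seen S).map pvId).Nodup := by
  induction S with
  | nil => intro seen; simp [pvDedup]
  | cons e S ih =>
      intro seen
      cases hseen : PySem.Set.contains seen (pvId e) with
      | true =>
          rw [show pvDedup seen (e :: S) = pvDedup seen S from by
            simp only [pvDedup, hseen]; rfl]
          exact ih seen
      | false =>
          rw [show pvDedup seen (e :: S)
                = e :: pvDedup (PySem.Set.add seen (pvId e)) S from by
            simp only [pvDedup, hseen]; rfl]
          rw [List.map_cons, List.nodup_cons]
          refine ⟨?_, ih _⟩
          intro hmem
          rcases List.mem_map.1 hmem with ⟨y, hy, hyid⟩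
          have h1 := ((pv_dedup_mem S _ y).1 hy).1
          rw [hyid, pv_contains_add_self] at h1
          cases h1

-- ---- keys ----

theorem pv_key_item (e : pvE) : pvKeyB (pvItem e) = pvKeyA e := rfl

theorem pv_key_inj (a b : pvE) (h : pvKeyA a = pvKeyA b) : pvId a = pvId b := by
  simp only [pvKeyA] at h
  have h1 := congrArg ofLex h
  simp only [ofLex_toLex] at h1
  have h2 := congrArg Prod.snd h1
  simp only at h2
  have h3 := congrArg ofLex h2
  simp only [ofLex_toLex] at h3
  exact congrArg Prod.snd h3

-- ---- both pipelines keep, for each id, the same single winner ----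

theorem pv_dedup_iff (rows : List (List (String × String))) (e : pvE) :
    e ∈ pvDedup PySem.Set.empty (PySem.List.sorted (pvEntriesA rows) pvKeyA)
      ↔ pvWE rows (pvId e) = some e := by
  rw [pv_dedup_mem]
  have hempty : PySem.Set.contains (PySem.Set.empty : PySem.Set String) (pvId e) = false := rfl
  rw [pv_filter_sorted, pv_head_sorted, pv_min3_eq_min2 _ (pvId e)
    (fun z hz => by simpa using (List.of_mem_filter hz)) none (by intro a ha; cases ha)]
  simp only [hempty, true_and]
  rfl

theorem pv_WE_id (rows : List (List (String × String))) (id : String) (e : pvE)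
    (h : pvWE rows id = some e) : pvId e = id := by
  rcases pv_min2_mem _ _ _ h with h' | h'
  · cases h'
  · simpa using List.of_mem_filter h'

theorem pv_get_best (rows : List (List (String × String))) (id : String) :
    (pvBestB rows).get? id = (pvWE rows id).map pvVal := by
  rw [pv_bfold, pv_get_fold, PySem.Dict.get?_empty, pvWE, pv_min_map, Option.map_none,
    List.foldl_filter]
  simp only [beq_iff_eq]

theorem pv_best_nodup (rows : List (List (String × String))) :
    (pvBestB rows).keys.Nodup := by
  rw [pv_bfold]
  exact pv_keys_nodup _ _ PySem.Dict.nodup_keys_empty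

-- ---- B's sorted items are exactly A's deduped sorted entries ----

theorem pv_sorted_items (rows : List (List (String × String))) :
    PySem.List.sorted (pvBestB rows).items pvKeyB
      = (pvDedup PySem.Set.empty (PySem.List.sorted (pvEntriesA rows) pvKeyA)).map pvItem := by
  apply PySem.List.sorted_eq_of_perm_of_pairwise_lt
  · -- a permutation: both lists hold exactly one item per id, with the same winner
    have hnodup1 : ((pvDedup PySem.Set.empty
        (PySem.List.sorted (pvEntriesA rows) pvKeyA)).map pvItem).Nodup := by
      apply List.Nodup.of_map (f := Prod.fst)
      rw [List.map_map]
      exact pv_dedup_nodup _ _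
    have hnodup2 : (pvBestB rows).items.Nodup :=
      List.Nodup.of_map _ (pv_best_nodup rows)
    apply (List.perm_ext_iff_of_nodup hnodup1 hnodup2).2
    intro a
    constructor
    · intro ha
      rcases List.mem_map.1 ha with ⟨e, he, rfl⟩
      have hw := (pv_dedup_iff rows e).1 he
      have hg : (pvBestB rows).get? (pvId e) = some (pvVal e) := by
        rw [pv_get_best, hw]; rfl
      exact (PySem.Dict.get?_eq_some_iff_mem_items _ _ _ (pv_best_nodup rows)).1 hg
    · intro ha
      obtain ⟨id, v⟩ := a
      have hget : (pvBestB rows).get? id = some v :=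
        (PySem.Dict.get?_eq_some_iff_mem_items _ _ _ (pv_best_nodup rows)).2 ha
      rw [pv_get_best] at hget
      rcases Option.map_eq_some_iff.1 hget with ⟨e, hwe, hv⟩
      have hid : pvId e = id := pv_WE_id rows id e hwe
      have he : e ∈ pvDedup PySem.Set.empty
          (PySem.List.sorted (pvEntriesA rows) pvKeyA) := by
        rw [pv_dedup_iff, hid]; exact hwe
      apply List.mem_map.2
      exact ⟨e, he, by rw [pvItem, hid, hv]⟩
  · -- strictly increasing under B's key
    rw [List.pairwise_map]
    simp only [pv_key_item]
    have hle : (pvDedup PySem.Set.empty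
        (PySem.List.sorted (pvEntriesA rows) pvKeyA)).Pairwise
          (fun a b => pvKeyA a ≤ pvKeyA b) :=
      List.Pairwise.sublist (pv_dedup_sublist _ _) (PySem.List.sorted_pairwise _ _)
    have hne : (pvDedup PySem.Set.empty
        (PySem.List.sorted (pvEntriesA rows) pvKeyA)).Pairwise
          (fun a b => pvId a ≠ pvId b) :=
      List.pairwise_map.1 (pv_dedup_nodup _ _)
    refine (hle.and hne).imp ?_
    rintro a b ⟨h1, h2⟩
    exact lt_of_le_of_ne h1 (fun hk => h2 (pv_key_inj a b hk))

-- ===== VERDICT (by name: the statement is the Claim_ definition above) =====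
theorem prepare_theory_table_spec : Claim_equal_prepare_theory_table := by
  intro rows _
  show prepare_theory_table rows = prepare_theory_table_alt rows
  unfold prepare_theory_table prepare_theory_table_alt
  rw [pv_aloop, List.nil_append, pv_sorted_items, List.map_map]
  rfl
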